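-- pv_equiv track=rewrite | github.com/Dibrary/Algorithm_playground | BOJ/silver/1436.py | check
-- ===== SOURCE A (Python) =====
-- def check(n):
--     nums = []
--     while n != 0:
--         nums.append(n % 10)
--         n //= 10
--
--     for i in range(len(nums)-2):
--         if nums[i] == 6 and nums[i+1] == 6 and nums[i+2] == 6:
--             return True
--
--     return False
-- ===== SOURCE B (Python) =====
-- def check(n):
--     run = 0
--     while n != 0:
--         if n % 10 == 6:
--             run += 1
--             if run == 3:
--                 return True
--         else:
--             run = 0
--         n //= 10
--     return False
-- ===== Notes on version B (the rewrite author's own statement) =====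
-- stated objective: simpler
-- what changed: Replaced A's two-phase extract-all-digits-into-a-list then scan-indexed-triples with a single fused pass over the digits that maintains a run counter of consecutive 6s and returns early.
import Mathlib
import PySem

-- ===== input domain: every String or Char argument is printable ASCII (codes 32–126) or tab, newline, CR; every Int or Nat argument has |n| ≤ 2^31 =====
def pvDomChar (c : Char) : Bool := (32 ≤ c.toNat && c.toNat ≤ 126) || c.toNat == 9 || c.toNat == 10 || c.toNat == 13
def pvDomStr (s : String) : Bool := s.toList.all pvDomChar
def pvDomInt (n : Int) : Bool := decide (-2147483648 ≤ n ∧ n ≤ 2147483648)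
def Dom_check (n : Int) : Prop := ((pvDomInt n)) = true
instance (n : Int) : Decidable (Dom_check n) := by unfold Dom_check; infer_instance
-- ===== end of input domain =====

-- B fuses A's extract-digit-list-then-scan-triples into one run-counting pass (simpler, O(1) space).

-- ===== PORT A =====
-- while n != 0: nums.append(n % 10); n //= 10   (fuel only makes the loop total; n.natAbs+1 suffices on Pre_)
def checkDigitsLoop (fuel : Nat) (n : Int) (nums : List Int) : List Int :=
  match fuel with
  | 0 => nums
  | fuel + 1 =>
    if n ≠ 0 then checkDigitsLoop fuel (PySem.Int.floordiv n 10) (nums ++ [PySem.Int.mod n 10])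
    else nums

def check (n : Int) : Bool :=
  let nums := checkDigitsLoop (n.natAbs + 1) n []
  (PySem.List.pyRange 0 ((nums.length : Int) - 2) 1).any (fun i =>
    (PySem.List.pyGetD nums i 0 == 6) && (PySem.List.pyGetD nums (i + 1) 0 == 6) &&
      (PySem.List.pyGetD nums (i + 2) 0 == 6))

-- ===== PORT B =====
-- while n != 0: run-counter over consecutive 6s, early return (fuel only makes the loop total)
def checkRunLoop (fuel : Nat) (n : Int) (run : Int) : Bool :=
  match fuel with
  | 0 => false
  | fuel + 1 =>
    if n ≠ 0 then
      if PySem.Int.mod n 10 == 6 then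
        if run + 1 == 3 then true
        else checkRunLoop fuel (PySem.Int.floordiv n 10) (run + 1)
      else checkRunLoop fuel (PySem.Int.floordiv n 10) 0
    else false

def check_alt (n : Int) : Bool := checkRunLoop (n.natAbs + 1) n 0

-- ===== PRECONDITION & SPEC =====
-- Python A never terminates on negative n (n //= 10 stalls at -1), so those inputs are excluded.
def Pre_check (n : Int) : Prop := 0 ≤ n
instance (n : Int) : Decidable (Pre_check n) := by unfold Pre_check; infer_instance
def pvWitness_check : Int := (666)

def Spec_check (n : Int) (out : Bool) : Prop := out = check_alt n
instance (n : Int) (out : Bool) : Decidable (Spec_check n out) := by unfold Spec_check; infer_instance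

-- ===== CLAIM (what is proved, stated in full; the proofs are below) =====
def Claim_equal_check : Prop := ∀ (n : Int), Dom_check n → Pre_check n → Spec_check n (check n)

-- ===== LEMMAS AND PROOFS =====

def pvDigits (m : Nat) : List Int :=
  if m = 0 then [] else ((m % 10 : Nat) : Int) :: pvDigits (m / 10)
decreasing_by exact Nat.div_lt_self (Nat.pos_of_ne_zero (by assumption)) (by norm_num)

def pvHasTriple : List Int → Bool
  | a :: b :: c :: rest => (a == 6 && b == 6 && c == 6) || pvHasTriple (b :: c :: rest)
  | _ => false

def pvRun666 : List Int → Int → Bool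
  | [], _ => false
  | d :: rest, r =>
    if d == 6 then (if r + 1 == 3 then true else pvRun666 rest (r + 1))
    else pvRun666 rest 0

theorem pvDigitsLoop_eq (m : Nat) : ∀ (fuel : Nat) (acc : List Int), m < fuel →
    checkDigitsLoop fuel (m : Int) acc = acc ++ pvDigits m := by
  induction m using Nat.strong_induction_on with
  | _ m ih =>
    intro fuel acc hf
    match fuel, hf with
    | fuel + 1, hf =>
      by_cases hm : m = 0
      · subst hm; simp [checkDigitsLoop, pvDigits]
      · have h10 : (0:Nat) < 10 := by norm_num
        have hlt : m / 10 < m := Nat.div_lt_self (Nat.pos_of_ne_zero hm) (by norm_num)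
        have hdiv : PySem.Int.floordiv (m : Int) 10 = ((m / 10 : Nat) : Int) := by
          exact_mod_cast PySem.Int.floordiv_natCast m 10
        have hmod : PySem.Int.mod (m : Int) 10 = ((m % 10 : Nat) : Int) := by
          exact_mod_cast PySem.Int.mod_natCast m 10
        have hne : (m : Int) ≠ 0 := by exact_mod_cast hm
        rw [checkDigitsLoop]
        simp only [hne, if_true, ne_eq, not_false_iff, hdiv, hmod]
        rw [ih (m / 10) hlt fuel _ (by omega)]
        conv_rhs => rw [pvDigits]
        simp [hm]

theorem pvRunLoop_eq (m : Nat) : ∀ (fuel : Nat) (r : Int), m < fuel →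
    checkRunLoop fuel (m : Int) r = pvRun666 (pvDigits m) r := by
  induction m using Nat.strong_induction_on with
  | _ m ih =>
    intro fuel r hf
    match fuel, hf with
    | fuel + 1, hf =>
      by_cases hm : m = 0
      · subst hm; simp [checkRunLoop, pvDigits, pvRun666]
      · have hlt : m / 10 < m := Nat.div_lt_self (Nat.pos_of_ne_zero hm) (by norm_num)
        have hdiv : PySem.Int.floordiv (m : Int) 10 = ((m / 10 : Nat) : Int) := by
          exact_mod_cast PySem.Int.floordiv_natCast m 10
        have hmod : PySem.Int.mod (m : Int) 10 = ((m % 10 : Nat) : Int) := by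
          exact_mod_cast PySem.Int.mod_natCast m 10
        have hne : (m : Int) ≠ 0 := by exact_mod_cast hm
        rw [checkRunLoop, pvDigits]
        simp only [hne, if_true, ne_eq, not_false_iff, hdiv, hmod, hm, if_false, pvRun666]
        by_cases h6 : ((m % 10 : Nat) : Int) == 6
        · simp only [h6, if_true]
          by_cases h3 : r + 1 == 3
          · simp [h3]
          · simp only [h3]
            exact ih (m / 10) hlt fuel _ (by omega)
        · simp only [h6]
          exact ih (m / 10) hlt fuel _ (by omega)

-- the index-scan of A equals the structural triple scan
def pvP (L : List Int) (i : Int) : Bool :=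
  (PySem.List.pyGetD L i 0 == 6) && (PySem.List.pyGetD L (i + 1) 0 == 6) &&
    (PySem.List.pyGetD L (i + 2) 0 == 6)

def pvQ (L : List Int) (k : Nat) : Bool :=
  (L.getD k 0 == 6) && (L.getD (k + 1) 0 == 6) && (L.getD (k + 2) 0 == 6)

theorem pvP_natCast (L : List Int) (k : Nat) : pvP L (k : Int) = pvQ L k := by
  simp only [pvP, pvQ]
  have h2 : (k : Int) + 2 = ((k + 2 : Nat) : Int) := by push_cast; ring
  have h1 : (k : Int) + 1 = ((k + 1 : Nat) : Int) := by push_cast; ring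
  rw [h2, h1, PySem.List.pyGetD_natCast, PySem.List.pyGetD_natCast, PySem.List.pyGetD_natCast]

theorem pvQ_shift (x : Int) (T : List Int) (k : Nat) : pvQ (x :: T) (k + 1) = pvQ T k := by
  simp [pvQ]

theorem pvScan_eq : ∀ (L : List Int),
    (PySem.List.pyRange 0 ((L.length : Int) - 2) 1).any (fun i =>
      (PySem.List.pyGetD L i 0 == 6) && (PySem.List.pyGetD L (i + 1) 0 == 6) &&
        (PySem.List.pyGetD L (i + 2) 0 == 6)) = pvHasTriple L
  | [] => by simp [pvHasTriple]
  | [a] => by simp [pvHasTriple]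
  | [a, b] => by simp [pvHasTriple]
  | a :: b :: c :: rest => by
    have ih : (PySem.List.pyRange 0 (((b :: c :: rest).length : Int) - 2) 1).any
        (pvP (b :: c :: rest)) = pvHasTriple (b :: c :: rest) := pvScan_eq (b :: c :: rest)
    show (PySem.List.pyRange 0 _ 1).any (pvP (a :: b :: c :: rest)) = _
    have hlen1 : (((a :: b :: c :: rest).length : Int) - 2) = ((rest.length + 1 : Nat) : Int) := by
      simp; omega
    have hlen2 : (((b :: c :: rest).length : Int) - 2) = ((rest.length : Nat) : Int) := by
      simp; omega
    rw [hlen1, PySem.List.pyRange_one]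
    rw [hlen2, PySem.List.pyRange_one] at ih
    simp only [sub_zero, Int.toNat_natCast, List.any_map] at ih ⊢
    rw [List.range_succ_eq_map]
    simp only [List.any_cons, List.any_map, Function.comp_def] at ih ⊢
    have hhead : pvP (a :: b :: c :: rest) ((0 : Int) + ((0 : Nat) : Int)) =
        (a == 6 && b == 6 && c == 6) := by
      rw [show ((0 : Int) + ((0 : Nat) : Int)) = (((0 : Nat) : Nat) : Int) from by omega,
        pvP_natCast]
      simp [pvQ]
    have htail : ∀ k : Nat, pvP (a :: b :: c :: rest) ((0 : Int) + ((k.succ : Nat) : Int)) =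
        pvP (b :: c :: rest) ((0 : Int) + ((k : Nat) : Int)) := by
      intro k
      rw [show ((0 : Int) + ((k.succ : Nat) : Int)) = ((k + 1 : Nat) : Int) from by omega,
        show ((0 : Int) + ((k : Nat) : Int)) = ((k : Nat) : Int) from by omega,
        pvP_natCast, pvP_natCast, pvQ_shift]
    rw [hhead,
      show ((List.range rest.length).any fun x => pvP (a :: b :: c :: rest) (0 + (x.succ : Int))) =
        ((List.range rest.length).any fun x => pvP (b :: c :: rest) (0 + (x : Int))) from
        PySem.List.any_congr_mem (fun k _ => htail k),
      ih]
    simp [pvHasTriple]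

theorem pvHT_cons_ne (d : Int) (h : ¬ d = 6) : ∀ (L : List Int),
    pvHasTriple (d :: L) = pvHasTriple L
  | [] => by simp [pvHasTriple]
  | [b] => by simp [pvHasTriple]
  | b :: c :: r => by simp [pvHasTriple, h]

theorem pvHT_six_ne (d : Int) (h : ¬ d = 6) : ∀ (L : List Int),
    pvHasTriple (6 :: d :: L) = pvHasTriple L
  | [] => by simp [pvHasTriple]
  | c :: r => by
    rw [show pvHasTriple (6 :: d :: c :: r) = ((6 == (6:Int)) && (d == 6) && (c == 6)
        || pvHasTriple (d :: c :: r)) from rfl]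
    simp [h, pvHT_cons_ne d h (c :: r)]

theorem pvRun_eq_hasTriple : ∀ (L : List Int) (r : Nat), r ≤ 2 →
    pvRun666 L (r : Int) = pvHasTriple (List.replicate r 6 ++ L)
  | [], r, hr => by interval_cases r <;> simp [pvRun666, pvHasTriple, List.replicate]
  | d :: rest, r, hr => by
    by_cases h6 : d = 6
    · subst h6
      rw [show pvRun666 (6 :: rest) (r : Int) =
          (if (r : Int) + 1 == 3 then true else pvRun666 rest ((r : Int) + 1)) from by
        simp [pvRun666]]
      interval_cases r
      · rw [if_neg (by decide)]
        rw [show ((0:Nat):Int) + 1 = ((1:Nat):Int) from by norm_num]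
        rw [pvRun_eq_hasTriple rest 1 (by norm_num)]
        simp [List.replicate]
      · rw [if_neg (by decide)]
        rw [show ((1:Nat):Int) + 1 = ((2:Nat):Int) from by norm_num]
        rw [pvRun_eq_hasTriple rest 2 (by norm_num)]
        simp [List.replicate]
      · rw [if_pos (by decide)]
        simp [List.replicate, pvHasTriple]
    · rw [show pvRun666 (d :: rest) (r : Int) = pvRun666 rest 0 from by
        simp [pvRun666, h6]]
      rw [show (0 : Int) = ((0:Nat):Int) from rfl, pvRun_eq_hasTriple rest 0 (by norm_num)]
      simp only [List.replicate, List.nil_append]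
      interval_cases r
      · simp [List.replicate, pvHT_cons_ne d h6 rest]
      · simp [List.replicate, pvHT_six_ne d h6 rest]
      · simp only [List.replicate, List.cons_append, List.nil_append]
        rw [show pvHasTriple (6 :: 6 :: d :: rest) = ((6 == (6:Int)) && (6 == (6:Int)) && (d == 6)
            || pvHasTriple (6 :: d :: rest)) from rfl]
        simp [h6, pvHT_six_ne d h6 rest]

-- ===== VERDICT (by name: the statement is the Claim_ definition above) =====
theorem check_spec : Claim_equal_check := by
  intro n _ hpre
  unfold Spec_check check check_alt
  obtain ⟨m, rfl⟩ := Int.eq_ofNat_of_zero_le hpre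
  have hfuel : m < (m : Int).natAbs + 1 := by simp
  rw [pvRunLoop_eq m _ 0 hfuel]
  have h0 := pvRun_eq_hasTriple (pvDigits m) 0 (by norm_num)
  norm_num at h0
  rw [h0]
  rw [pvDigitsLoop_eq m _ [] hfuel]
  simp only [List.nil_append]
  exact pvScan_eq (pvDigits m)
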